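-- pv_equiv track=rewrite | github.com/ronme06928-PowerfulFox/gemtrpg-bot | manager/granted_skills/service.py | _upsert_granted_entry
-- ===== SOURCE A (Python) =====
-- def _upsert_granted_entry(granted_skills, entry):
--     sid = str(entry.get("skill_id", "") or "").strip()
--     if not sid:
--         return granted_skills
--
--     out = []
--     replaced = False
--     for row in granted_skills:
--         if not isinstance(row, dict):
--             continue
--         if str(row.get("skill_id", "") or "").strip() == sid:
--             if not replaced:
--                 out.append(dict(entry))
--                 replaced = True
--             continue
--         out.append(row)
--     if not replaced:
--         out.append(dict(entry))
--     return out
-- ===== SOURCE B (Python) =====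
-- def _upsert_granted_entry(granted_skills, entry):
--     sid = str(entry.get("skill_id", "") or "").strip()
--     if not sid:
--         return granted_skills
--
--     norm = lambda r: str(r.get("skill_id", "") or "").strip()
--     rows = [r for r in granted_skills if isinstance(r, dict)]
--     first = next((i for i, r in enumerate(rows) if norm(r) == sid), None)
--     if first is None:
--         return rows + [dict(entry)]
--     return rows[:first] + [dict(entry)] + [r for r in rows[first + 1:] if norm(r) != sid]
-- ===== Notes on version B (the rewrite author's own statement) =====
-- stated objective: alternative
-- what changed: Replaces the single pass with an out-list and a replaced flag by a find-first-index decomposition: locate the first matching row, then return prefix + copied entry + a filtered suffix (or rows + entry when no match).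
import Mathlib
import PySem

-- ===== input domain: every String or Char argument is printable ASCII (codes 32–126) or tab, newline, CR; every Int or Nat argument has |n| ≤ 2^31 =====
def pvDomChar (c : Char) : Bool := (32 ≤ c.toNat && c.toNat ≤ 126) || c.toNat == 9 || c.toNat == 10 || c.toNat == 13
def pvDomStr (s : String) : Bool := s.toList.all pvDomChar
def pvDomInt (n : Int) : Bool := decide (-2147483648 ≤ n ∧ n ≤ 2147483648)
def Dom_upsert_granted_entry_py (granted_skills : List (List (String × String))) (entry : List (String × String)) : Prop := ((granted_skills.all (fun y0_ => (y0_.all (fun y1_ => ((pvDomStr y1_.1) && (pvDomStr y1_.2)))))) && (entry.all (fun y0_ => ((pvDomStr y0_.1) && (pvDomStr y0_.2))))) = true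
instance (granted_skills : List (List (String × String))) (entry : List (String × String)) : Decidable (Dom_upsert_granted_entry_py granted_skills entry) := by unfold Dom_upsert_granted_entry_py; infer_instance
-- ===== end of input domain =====

-- B differs by decomposition: find the first matching row, then prefix + entry + filtered suffix,
-- instead of A's single pass with an out-accumulator and a replaced flag. Same cost; equivalence of return values proved below.

-- ===== PORT A =====
-- shared normalization: str(row.get("skill_id", "") or "").strip()  ('x or ""' is the identity on strings)
def pvNorm (row : List (String × String)) : String :=
  PySem.Str.strip (PySem.Dict.getD (PySem.Dict.mk row) "skill_id" "")

-- the for-loop of A, with its out-accumulator and replaced flag (isinstance(row, dict) is always true here)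
def pvLoopA (entry : List (String × String)) (sid : String) :
    List (List (String × String)) → List (List (String × String)) → Bool → List (List (String × String))
  | [], out, replaced => if replaced then out else out ++ [entry]
  | row :: rest, out, replaced =>
      if pvNorm row = sid then
        if replaced then pvLoopA entry sid rest out true
        else pvLoopA entry sid rest (out ++ [entry]) true
      else pvLoopA entry sid rest (out ++ [row]) replaced

def upsert_granted_entry_py (granted_skills : List (List (String × String))) (entry : List (String × String)) : List (List (String × String)) :=
  let sid := pvNorm entry
  if sid = "" then granted_skills
  else pvLoopA entry sid granted_skills [] false

-- ===== PORT B =====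
def upsert_granted_entry_py_alt (granted_skills : List (List (String × String))) (entry : List (String × String)) : List (List (String × String)) :=
  let sid := pvNorm entry
  if sid = "" then granted_skills
  else
    let keep := fun row => decide (pvNorm row ≠ sid)
    match granted_skills.dropWhile keep with
    | [] => granted_skills ++ [entry]
    | _ :: tl => granted_skills.takeWhile keep ++ entry :: tl.filter keep

-- ===== PRECONDITION & SPEC =====
def Spec_upsert_granted_entry_py (granted_skills : List (List (String × String))) (entry : List (String × String)) (out : List (List (String × String))) : Prop := out = upsert_granted_entry_py_alt granted_skills entry
instance (granted_skills : List (List (String × String))) (entry : List (String × String)) (out : List (List (String × String))) : Decidable (Spec_upsert_granted_entry_py granted_skills entry out) := by unfold Spec_upsert_granted_entry_py; infer_instance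

-- ===== CLAIM (what is proved, stated in full; the proofs are below) =====
def Claim_equal_upsert_granted_entry_py : Prop := ∀ (granted_skills : List (List (String × String))) (entry : List (String × String)), Dom_upsert_granted_entry_py granted_skills entry → Spec_upsert_granted_entry_py granted_skills entry (upsert_granted_entry_py granted_skills entry)

-- ===== LEMMAS AND PROOFS =====

-- the accumulator is a pure prefix of the loop's result
theorem pvLoopA_acc (entry : List (String × String)) (sid : String)
    (l out : List (List (String × String))) (b : Bool) :
    pvLoopA entry sid l out b = out ++ pvLoopA entry sid l [] b := by
  induction l generalizing out b with
  | nil => cases b <;> simp [pvLoopA]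
  | cons row rest ih =>
    simp only [pvLoopA]
    split
    · split
      · exact ih out true
      · rw [ih (out ++ [entry]) true, ih ([] ++ [entry]) true]; simp
    · rw [ih (out ++ [row]) b, ih ([] ++ [row]) b]; simp

-- once replaced, the rest of the loop is a filter
theorem pvLoopA_true (entry : List (String × String)) (sid : String)
    (l : List (List (String × String))) :
    pvLoopA entry sid l [] true = l.filter (fun row => decide (pvNorm row ≠ sid)) := by
  induction l with
  | nil => simp [pvLoopA]
  | cons row rest ih =>
    by_cases h : pvNorm row = sid
    · simp [pvLoopA, h, ih]
    · simp only [pvLoopA, if_neg h]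
      rw [pvLoopA_acc, ih]
      simp [h]

theorem pvLoopA_eq_alt (entry : List (String × String)) (sid : String)
    (l : List (List (String × String))) :
    pvLoopA entry sid l [] false =
      (match l.dropWhile (fun row => decide (pvNorm row ≠ sid)) with
       | [] => l ++ [entry]
       | _ :: tl => l.takeWhile (fun row => decide (pvNorm row ≠ sid)) ++
           entry :: tl.filter (fun row => decide (pvNorm row ≠ sid))) := by
  induction l with
  | nil => simp [pvLoopA]
  | cons row rest ih =>
    by_cases h : pvNorm row = sid
    · have step : pvLoopA entry sid (row :: rest) [] false =
          pvLoopA entry sid rest [entry] true := by simp [pvLoopA, h]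
      rw [step, pvLoopA_acc, pvLoopA_true]
      simp [h]
    · have step : pvLoopA entry sid (row :: rest) [] false =
          pvLoopA entry sid rest [row] false := by simp [pvLoopA, h]
      rw [step, pvLoopA_acc, ih]
      simp only [decide_not]
      cases hd : rest.dropWhile (fun row => !decide (pvNorm row = sid)) <;> simp [h, hd]

-- ===== VERDICT (by name: the statement is the Claim_ definition above) =====
theorem upsert_granted_entry_py_spec : Claim_equal_upsert_granted_entry_py := by
  intro gs entry _
  unfold Spec_upsert_granted_entry_py upsert_granted_entry_py upsert_granted_entry_py_alt
  by_cases h : pvNorm entry = "" <;> simp [h, pvLoopA_eq_alt]
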